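-- pv_equiv track=rewrite | github.com/ralskwo/CodingTest | BAEKJOON/1003 - 피보나치 함수/피보나치 함수.py | fibonacci_counts
-- ===== SOURCE A (Python) =====
-- def fibonacci_counts(N):
--     # N번째 피보나치 수를 계산할 때 0과 1이 각각 몇 번 출력되는지 구하는 함수
--
--     # dp_zero는 N번째 피보나치 수를 계산할 때 0이 출력되는 횟수를 저장하는 리스트
--     # dp_one은 N번째 피보나치 수를 계산할 때 1이 출력되는 횟수를 저장하는 리스트
--     # 리스트의 크기를 N+1로 설정해 N까지의 값을 모두 저장할 수 있게 함
--     dp_zero = [0] * (N + 1)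
--     dp_one = [0] * (N + 1)
--
--     # 피보나치 수열에서 N이 0일 때, 0이 한 번 출력되고, 1은 출력되지 않음
--     # 따라서 dp_zero[0]은 1, dp_one[0]은 0으로 초기화
--     dp_zero[0] = 1
--     dp_one[0] = 0
--
--     # 피보나치 수열에서 N이 1일 때, 1이 한 번 출력되고, 0은 출력되지 않음
--     # 따라서 dp_zero[1]은 0, dp_one[1]은 1로 초기화
--     if N > 0:
--         dp_zero[1] = 0
--         dp_one[1] = 1
--
--     # 피보나치 수열의 특성에 따라 dp_zero[i]는 dp_zero[i-1]과 dp_zero[i-2]의 합이 됨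
--     # 마찬가지로 dp_one[i]도 dp_one[i-1]과 dp_one[i-2]의 합이 됨
--     # 이를 통해 피보나치 수를 계산하는 과정에서 0과 1이 출력되는 횟수를 누적하여 계산
--     for i in range(2, N + 1):
--         dp_zero[i] = dp_zero[i-1] + dp_zero[i-2]
--         dp_one[i] = dp_one[i-1] + dp_one[i-2]
--
--     # 주어진 N에 대해 0과 1이 각각 몇 번 출력되었는지를 반환
--     return dp_zero[N], dp_one[N]
-- ===== SOURCE B (Python) =====
-- def fibonacci_counts(N):
--     # Fast doubling: fib_pair(n) returns (F(n), F(n+1)) in O(log n) steps.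
--     # The counts are (F(N-1), F(N)) with F(-1) = 1, i.e. (F(N+1) - F(N), F(N)).
--     def fib_pair(n):
--         if n == 0:
--             return (0, 1)
--         a, b = fib_pair(n >> 1)
--         c = a * (2 * b - a)
--         d = a * a + b * b
--         if n & 1:
--             return (d, c + d)
--         return (c, d)
--     a, b = fib_pair(N)
--     return (b - a, a)
-- ===== Notes on version B (the rewrite author's own statement) =====
-- stated objective: faster
-- what changed: Replaced the O(N) DP over two size-N+1 arrays by fast-doubling Fibonacci recursion (the counts are (F(N-1), F(N))), computing the pair in O(log N) multiplications.
import Mathlib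
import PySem

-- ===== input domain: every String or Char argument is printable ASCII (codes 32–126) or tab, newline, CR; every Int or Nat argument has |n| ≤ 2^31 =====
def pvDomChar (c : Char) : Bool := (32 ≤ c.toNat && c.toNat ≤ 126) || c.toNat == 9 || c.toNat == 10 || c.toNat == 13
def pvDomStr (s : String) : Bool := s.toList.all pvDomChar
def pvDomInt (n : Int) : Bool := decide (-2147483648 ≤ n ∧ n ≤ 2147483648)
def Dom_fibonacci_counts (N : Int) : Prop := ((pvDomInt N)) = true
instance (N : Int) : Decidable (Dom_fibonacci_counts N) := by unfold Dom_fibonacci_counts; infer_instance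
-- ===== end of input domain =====

-- B replaces A's O(N) bottom-up DP over two arrays by O(log N) fast-doubling Fibonacci recursion.

-- ===== PORT A =====
-- Literal transliteration of A: two [0]*(N+1) lists, seeded at 0 (and 1 when N > 0),
-- then dp[i] = dp[i-1] + dp[i-2] for i in range(2, N+1), return (dp_zero[N], dp_one[N]).
-- Indexing/assignment uses PySem pyGetD/pySetD, exact here since under Pre_ (0 ≤ N)
-- every Python index is in range; on N < 0 Python raises IndexError (excluded by Pre_).
def fibonacci_counts (N : Int) : Int × Int :=
  let dp_zero : List Int := List.replicate ((N + 1).toNat) 0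
  let dp_one  : List Int := List.replicate ((N + 1).toNat) 0
  let dp_zero := PySem.List.pySetD dp_zero 0 1
  let dp_one  := PySem.List.pySetD dp_one 0 0
  let s :=
    if N > 0 then (PySem.List.pySetD dp_zero 1 0, PySem.List.pySetD dp_one 1 1)
    else (dp_zero, dp_one)
  let s :=
    (PySem.List.pyRange 2 (N + 1) 1).foldl
      (fun (s : List Int × List Int) i =>
        let z := PySem.List.pySetD s.1 i
          (PySem.List.pyGetD s.1 (i - 1) 0 + PySem.List.pyGetD s.1 (i - 2) 0)
        let o := PySem.List.pySetD s.2 i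
          (PySem.List.pyGetD s.2 (i - 1) 0 + PySem.List.pyGetD s.2 (i - 2) 0)
        (z, o)) s
  (PySem.List.pyGetD s.1 N 0, PySem.List.pyGetD s.2 N 0)

-- ===== PORT B =====
-- fib_pair(n) = (F(n), F(n+1)) by fast doubling; n >> 1 = n / 2 and n & 1 = n % 2 on n ≥ 0.
def fibPairAlt (n : Nat) : Int × Int :=
  if h : n = 0 then (0, 1)
  else
    let p := fibPairAlt (n / 2)
    let a := p.1
    let b := p.2
    let c := a * (2 * b - a)
    let d := a * a + b * b
    if n % 2 = 1 then (d, c + d) else (c, d)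
decreasing_by exact Nat.div_lt_self (Nat.pos_of_ne_zero h) (by norm_num)

def fibonacci_counts_alt (N : Int) : Int × Int :=
  let p := fibPairAlt N.toNat
  (p.2 - p.1, p.1)

-- ===== PRECONDITION & SPEC =====
-- A raises IndexError (dp_zero[0] on an empty list) for every N < 0; nothing else is excluded.
def Pre_fibonacci_counts (N : Int) : Prop := 0 ≤ N
instance (N : Int) : Decidable (Pre_fibonacci_counts N) := by unfold Pre_fibonacci_counts; infer_instance
def pvWitness_fibonacci_counts : Int := (5)

def Spec_fibonacci_counts (N : Int) (out : Int × Int) : Prop := out = fibonacci_counts_alt N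
instance (N : Int) (out : Int × Int) : Decidable (Spec_fibonacci_counts N out) := by unfold Spec_fibonacci_counts; infer_instance

-- ===== CLAIM (what is proved, stated in full; the proofs are below) =====
def Claim_equal_fibonacci_counts : Prop := ∀ (N : Int), Dom_fibonacci_counts N → Pre_fibonacci_counts N → Spec_fibonacci_counts N (fibonacci_counts N)

-- ===== LEMMAS AND PROOFS =====

-- Fibonacci over Int (cast of Nat.fib).
def fibI (n : Nat) : Int := (Nat.fib n : Int)

lemma fibI_add_two (n : Nat) : fibI (n + 2) = fibI (n + 1) + fibI n := by
  simp only [fibI, Nat.fib_add_two]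
  push_cast
  ring

lemma fib_even (m : Nat) : fibI (2 * m) = fibI m * (2 * fibI (m + 1) - fibI m) := by
  have h2 : Nat.fib m ≤ 2 * Nat.fib (m + 1) :=
    le_trans Nat.fib_le_fib_succ (by omega)
  simp only [fibI, Nat.fib_two_mul]
  rw [Nat.cast_mul, Nat.cast_sub h2]
  push_cast; ring

lemma fib_odd (m : Nat) : fibI (2 * m + 1) = fibI m * fibI m + fibI (m + 1) * fibI (m + 1) := by
  simp only [fibI, Nat.fib_two_mul_add_one]
  push_cast
  ring

-- fast doubling is Fibonacci
lemma fibPairAlt_eq (n : Nat) : fibPairAlt n = (fibI n, fibI (n + 1)) := by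
  induction n using Nat.strong_induction_on with
  | _ n ih =>
    by_cases h : n = 0
    · subst h; simp [fibPairAlt, fibI]
    · rw [fibPairAlt]
      simp only [h, dif_neg, not_false_iff]
      rw [ih (n / 2) (Nat.div_lt_self (Nat.pos_of_ne_zero h) (by norm_num))]
      by_cases hp : n % 2 = 1
      · have hn : n = 2 * (n / 2) + 1 := by omega
        rw [if_pos hp]
        conv_rhs => rw [hn]
        simp only [Prod.mk.injEq]
        constructor
        · exact (fib_odd _).symm
        · rw [show 2 * (n / 2) + 1 + 1 = 2 * (n / 2) + 2 from rfl, fibI_add_two, fib_odd, fib_even]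
          ring
      · have hn : n = 2 * (n / 2) := by omega
        rw [if_neg hp]
        conv_rhs => rw [hn]
        simp only [Prod.mk.injEq]
        exact ⟨(fib_even _).symm, (fib_odd _).symm⟩

lemma alt_eq (n : Nat) : fibonacci_counts_alt (n : Int) =
    (fibI (n + 1) - fibI n, fibI n) := by
  simp [fibonacci_counts_alt, fibPairAlt_eq]

-- the loop-state abstraction for A: entries j ≤ k are filled, the rest still 0
def stZ (n k : Nat) : List Int :=
  (List.range (n + 1)).map (fun j => if j ≤ k then fibI (j + 1) - fibI j else 0)
def stO (n k : Nat) : List Int :=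
  (List.range (n + 1)).map (fun j => if j ≤ k then fibI j else 0)

lemma getD_stZ (n k j : Nat) (hj : j ≤ n) :
    (stZ n k).getD j 0 = if j ≤ k then fibI (j + 1) - fibI j else 0 := by
  simp [stZ, List.getD_eq_getElem?_getD, List.getElem?_map,
    List.getElem?_range (show j < n + 1 by omega)]

lemma getD_stO (n k j : Nat) (hj : j ≤ n) :
    (stO n k).getD j 0 = if j ≤ k then fibI j else 0 := by
  simp [stO, List.getD_eq_getElem?_getD, List.getElem?_map,
    List.getElem?_range (show j < n + 1 by omega)]

lemma set_stZ (n k : Nat) (_hk : k + 1 ≤ n) :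
    (stZ n k).set (k + 1) (fibI (k + 2) - fibI (k + 1)) = stZ n (k + 1) := by
  apply List.ext_getElem
  · simp [stZ]
  · intro i h1 h2
    simp only [stZ, List.length_set, List.length_map, List.length_range] at h1
    rw [List.getElem_set]
    simp only [stZ, List.getElem_map, List.getElem_range]
    by_cases h : k + 1 = i
    · subst h; simp
    · rw [if_neg h]
      by_cases h2 : i ≤ k
      · rw [if_pos h2, if_pos (by omega)]
      · rw [if_neg h2, if_neg (by omega)]

lemma set_stO (n k : Nat) (_hk : k + 1 ≤ n) :
    (stO n k).set (k + 1) (fibI (k + 1)) = stO n (k + 1) := by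
  apply List.ext_getElem
  · simp [stO]
  · intro i h1 h2
    simp only [stO, List.length_set, List.length_map, List.length_range] at h1
    rw [List.getElem_set]
    simp only [stO, List.getElem_map, List.getElem_range]
    by_cases h : k + 1 = i
    · subst h; simp
    · rw [if_neg h]
      by_cases h2 : i ≤ k
      · rw [if_pos h2, if_pos (by omega)]
      · rw [if_neg h2, if_neg (by omega)]

-- one iteration of A's loop body, on the abstract state
lemma step_state (n k : Nat) (h1 : 1 ≤ k) (h2 : k + 1 ≤ n) :
    (fun (s : List Int × List Int) (i : Int) =>
      let z := PySem.List.pySetD s.1 i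
        (PySem.List.pyGetD s.1 (i - 1) 0 + PySem.List.pyGetD s.1 (i - 2) 0)
      let o := PySem.List.pySetD s.2 i
        (PySem.List.pyGetD s.2 (i - 1) 0 + PySem.List.pyGetD s.2 (i - 2) 0)
      (z, o)) (stZ n k, stO n k) ((k : Int) + 1) = (stZ n (k + 1), stO n (k + 1)) := by
  have e3 : (k : Int) + 1 = (((k + 1 : Nat) : Nat) : Int) := by push_cast; ring
  simp only [e3, PySem.List.pySetD_natCast, Int.toNat_natCast]
  have e1 : (((k + 1 : Nat) : Nat) : Int) - 1 = ((k : Nat) : Int) := by push_cast; ring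
  have e2 : (((k + 1 : Nat) : Nat) : Int) - 2 = (((k - 1 : Nat) : Nat) : Int) := by omega
  simp only [e1, e2, PySem.List.pyGetD_natCast]
  rw [getD_stZ n k k (by omega), getD_stZ n k (k - 1) (by omega),
      getD_stO n k k (by omega), getD_stO n k (k - 1) (by omega)]
  simp only [le_refl, if_pos, Nat.sub_le, Prod.mk.injEq]
  have hk1 : k - 1 + 1 = k := by omega
  have hk2 : k - 1 + 2 = k + 1 := by omega
  have rZ : fibI (k + 1) - fibI k + (fibI (k - 1 + 1) - fibI (k - 1)) =
      fibI (k + 2) - fibI (k + 1) := by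
    have t1 := fibI_add_two k
    have t2 := fibI_add_two (k - 1)
    rw [hk1, hk2] at t2
    rw [hk1]
    omega
  have rO : fibI k + fibI (k - 1) = fibI (k + 1) := by
    have t2 := fibI_add_two (k - 1)
    rw [hk1, hk2] at t2
    omega
  constructor
  · rw [rZ]; exact set_stZ n k h2
  · rw [rO]; exact set_stO n k h2

-- folding A's loop from the seeded state reaches stZ/stO n k
lemma loop_state (n : Nat) : ∀ (k : Nat), 1 ≤ k → k ≤ n →
    (PySem.List.pyRange 2 ((k : Int) + 1) 1).foldl
      (fun (s : List Int × List Int) (i : Int) =>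
        let z := PySem.List.pySetD s.1 i
          (PySem.List.pyGetD s.1 (i - 1) 0 + PySem.List.pyGetD s.1 (i - 2) 0)
        let o := PySem.List.pySetD s.2 i
          (PySem.List.pyGetD s.2 (i - 1) 0 + PySem.List.pyGetD s.2 (i - 2) 0)
        (z, o)) (stZ n 1, stO n 1) = (stZ n k, stO n k) := by
  intro k
  induction k with
  | zero => omega
  | succ k ih =>
    intro _ hkn
    by_cases hk : k = 0
    · subst hk
      rw [show ((1 : Nat) : Int) + 1 = 2 by norm_num, PySem.List.pyRange_one_eq_nil (by norm_num)]
      rfl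
    · have hk1 : 1 ≤ k := by omega
      have e : ((k + 1 : Nat) : Int) + 1 = ((k : Int) + 1) + 1 := by push_cast; ring
      rw [e, PySem.List.pyRange_one_succ_right (by omega), List.foldl_append,
          ih hk1 (by omega)]
      exact step_state n k hk1 (by omega)

-- the seeded (pre-loop) state of A, for N = n ≥ 1, is stZ/stO n 1
lemma init_state (n : Nat) (hn : 1 ≤ n) :
    (PySem.List.pySetD (PySem.List.pySetD (List.replicate ((((n : Int)) + 1).toNat) (0 : Int)) 0 1) 1 0,
     PySem.List.pySetD (PySem.List.pySetD (List.replicate ((((n : Int)) + 1).toNat) (0 : Int)) 0 0) 1 1)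
    = (stZ n 1, stO n 1) := by
  have hlen : (((n : Int)) + 1).toNat = n + 1 := by omega
  rw [hlen]
  rw [show (0 : Int) = ((0 : Nat) : Int) from rfl, show (1 : Int) = ((1 : Nat) : Int) from rfl]
  simp only [PySem.List.pySetD_natCast]
  rw [Prod.mk.injEq]
  constructor <;>
  · apply List.ext_getElem
    · simp [stZ, stO]
    · intro i hi1 hi2
      simp only [stZ, stO, List.getElem_map, List.getElem_range]
      rw [List.getElem_set, List.getElem_set]
      simp only [List.getElem_replicate]
      rcases i with _ | _ | i <;> simp [fibI]

-- A's result on N = n : Nat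
lemma a_eq (n : Nat) : fibonacci_counts (n : Int) = (fibI (n + 1) - fibI n, fibI n) := by
  by_cases hn : n = 0
  · subst hn; decide
  · have hn1 : 1 ≤ n := by omega
    unfold fibonacci_counts
    simp only []
    rw [if_pos (by exact_mod_cast Nat.pos_of_ne_zero hn)]
    rw [init_state n hn1]
    rw [loop_state n n hn1 le_rfl]
    simp only [PySem.List.pyGetD_natCast]
    rw [getD_stZ n n n le_rfl, getD_stO n n n le_rfl]
    simp

-- ===== VERDICT (by name: the statement is the Claim_ definition above) =====
theorem fibonacci_counts_spec : Claim_equal_fibonacci_counts := by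
  intro N _ hpre
  unfold Spec_fibonacci_counts
  obtain ⟨n, rfl⟩ := Int.eq_ofNat_of_zero_le hpre
  rw [a_eq n, alt_eq n]
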